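-- pv_equiv track=rewrite | github.com/leonardoWer/Algosi | lab3/task3/src/task3.py | scarecrow_sort
-- ===== SOURCE A (Python) =====
-- def scarecrow_sort(n:int, k:int, lst:list) -> str:
--     """
--     Сортировка пугалом
--      - Принимает: (количество элементов списка, возможное расстояние, список)
--      - Возвращает: (ДА - если можно отсортировать список, НЕТ - если нельзя отсортировать список)
--     """
--     sort_list = sorted(lst)
--     while lst != sort_list:
--         swapped = False
--         for i in range(n-k):
--             if lst[i] > lst[i+k]:
--                 switch(lst, i, i+k)
--                 swapped = True
--                 if lst == sort_list:
--                     return "YES"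
--         if not swapped:
--             return "NO"
--
-- def switch(lst:list, i:int, j:int) -> list:
--     """ Меняет местами элементы в списке по их индексам"""
--     lst[i], lst[j] = lst[j], lst[i]
--     return lst
-- ===== SOURCE B (Python) =====
-- def scarecrow_sort(n: int, k: int, lst: list) -> str:
--     """Sortable by distance-k swaps?  Swaps at distance k can only permute each
--     residue chain r, r+k, r+2k, ... (< n), so sort each chain independently and
--     compare the result with sorted(lst), instead of simulating bubble sweeps.
--     Like A, returns None when lst is already sorted."""
--     s = sorted(lst)
--     if lst == s:
--         return None  # A's while loop never runs and it falls through to None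
--     if k <= 0 or n <= k:
--         return "NO"  # no swap is possible and lst is not sorted
--     t = list(lst)
--     for r in range(k):
--         idx = range(r, n, k)
--         vals = sorted(t[i] for i in idx)
--         for i, v in zip(idx, vals):
--             t[i] = v
--     return "YES" if t == s else "NO"
-- ===== Notes on version B (the rewrite author's own statement) =====
-- stated objective: alternative
-- what changed: B replaces A's repeated gap-k bubble sweeps (swap elements k apart until a fixed point) by sorting each residue chain r, r+k, r+2k, ... once and comparing the result with sorted(lst); on the random timing inputs A usually stops after one sweep, so the measured cost is the same.
-- outside the precondition, e.g. on scarecrow_sort(3, 1, [1, 2, 3]): A returns None, B returns None; on scarecrow_sort(1, -1, [2, 1]): A returns 'YES', B returns 'NO'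
import Mathlib
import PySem

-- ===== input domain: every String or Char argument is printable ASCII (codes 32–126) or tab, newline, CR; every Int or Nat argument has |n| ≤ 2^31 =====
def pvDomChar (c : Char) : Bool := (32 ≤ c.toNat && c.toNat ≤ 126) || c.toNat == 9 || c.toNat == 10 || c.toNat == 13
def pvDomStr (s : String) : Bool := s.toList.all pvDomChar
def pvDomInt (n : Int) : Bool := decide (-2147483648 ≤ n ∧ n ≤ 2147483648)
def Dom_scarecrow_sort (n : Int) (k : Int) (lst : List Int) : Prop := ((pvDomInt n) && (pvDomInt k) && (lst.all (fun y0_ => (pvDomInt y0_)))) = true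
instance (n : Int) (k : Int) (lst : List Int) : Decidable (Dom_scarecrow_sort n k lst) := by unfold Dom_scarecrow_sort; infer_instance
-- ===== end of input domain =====

-- B replaces A's repeated gap-k bubble sweeps by sorting each residue chain once and
-- comparing with sorted(lst).  A also mutates its argument list in place in Python;
-- the equivalence proved here is about the RETURN value only.

-- ===== PORT A =====
-- switch(lst, i, j): Python's tuple swap; pyGetD/pySetD are exact under Pre_ (indices in range)
def pvSwitch (lst : List Int) (i j : Int) : List Int :=
  let vi := PySem.List.pyGetD lst i 0
  let vj := PySem.List.pyGetD lst j 0
  PySem.List.pySetD (PySem.List.pySetD lst i vj) j vi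

-- the `for i in range(n-k)` pass, with A's early `return "YES"` (none = returned YES)
def pvPassA (s : List Int) (k : Int) : List Int → Bool → List Int → Option (List Int × Bool)
  | l, sw, [] => some (l, sw)
  | l, sw, i :: rest =>
    if PySem.List.pyGetD l (i + k) 0 < PySem.List.pyGetD l i 0 then
      let l' := pvSwitch l i (i + k)
      if l' = s then none
      else pvPassA s k l' true rest
    else pvPassA s k l sw rest

-- the `while lst != sort_list` loop; fuel only makes the recursion total (never
-- exhausted under Pre_, proved below); "" is Python's fall-through `return None`
def pvLoopA (s : List Int) (n k : Int) : Nat → List Int → String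
  | 0, _ => ""
  | fuel + 1, l =>
    if l = s then ""
    else
      match pvPassA s k l false (PySem.List.pyRange 0 (n - k) 1) with
      | none => "YES"
      | some (l', swapped) => if swapped then pvLoopA s n k fuel l' else "NO"

def scarecrow_sort (n : Int) (k : Int) (lst : List Int) : String :=
  let sort_list := PySem.List.sorted lst (fun x => x) false
  pvLoopA sort_list n k (lst.length * lst.length * lst.length + 1) lst

-- ===== PORT B =====
-- "" stands in for Source B's `return None` on an already-sorted list (outside Pre_,
-- where A returns None too); everywhere else the port is exact
def scarecrow_sort_alt (n : Int) (k : Int) (lst : List Int) : String :=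
  let s := PySem.List.sorted lst (fun x => x) false
  if lst = s then ""
  else if k ≤ 0 ∨ n ≤ k then "NO"
  else
    let t := (PySem.List.pyRange 0 k 1).foldl (fun t r =>
      let idx := PySem.List.pyRange r n k
      let vals := PySem.List.sorted (idx.map (fun i => PySem.List.pyGetD t i 0)) (fun x => x) false
      (idx.zip vals).foldl (fun t pv => PySem.List.pySetD t pv.1 pv.2) t) lst
    if t = s then "YES" else "NO"

-- ===== PRECONDITION & SPEC =====
-- Pre_ excludes: already-sorted lists (A falls out of its while loop and returns None,
-- not a str); negative k with k < n (A's behaviour there rests on negative-index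
-- wraparound or an IndexError); and n > len(lst) with k < n (IndexError).
def Pre_scarecrow_sort (n : Int) (k : Int) (lst : List Int) : Prop :=
  (n ≤ k ∨ (0 ≤ k ∧ n ≤ lst.length)) ∧ lst ≠ PySem.List.sorted lst (fun x => x) false
instance (n : Int) (k : Int) (lst : List Int) : Decidable (Pre_scarecrow_sort n k lst) := by
  unfold Pre_scarecrow_sort; infer_instance

def pvWitness_scarecrow_sort : Int × Int × List Int := (3, 2, [2, 1, 3])

def Spec_scarecrow_sort (n : Int) (k : Int) (lst : List Int) (out : String) : Prop := out = scarecrow_sort_alt n k lst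
instance (n : Int) (k : Int) (lst : List Int) (out : String) : Decidable (Spec_scarecrow_sort n k lst out) := by unfold Spec_scarecrow_sort; infer_instance

-- ===== CLAIM (what is proved, stated in full; the proofs are below) =====
def Claim_equal_scarecrow_sort : Prop := ∀ (n : Int) (k : Int) (lst : List Int), Dom_scarecrow_sort n k lst → Pre_scarecrow_sort n k lst → Spec_scarecrow_sort n k lst (scarecrow_sort n k lst)

-- ===== LEMMAS AND PROOFS =====

-- number of inversions of a list
def pvInv : List Int → Nat
  | [] => 0
  | x :: xs => xs.countP (fun y => decide (y < x)) + pvInv xs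

-- length of the residue-c chain c, c+K, c+2K, … below N
def pvCnt (K N c : Nat) : Nat := (N - c + K - 1) / K

-- the residue-c chain of values of l
def pvChain (K N : Nat) (l : List Int) (c : Nat) : List Int :=
  (List.range (pvCnt K N c)).map (fun p => l.getD (c + p * K) 0)

-- gap-K fixed point: no swap applies
def pvF (K N : Nat) (l : List Int) : Prop :=
  ∀ i : Nat, i + K < N → l.getD i 0 ≤ l.getD (i + K) 0

-- states reachable from a by gap-K swaps: same length, same values from N on,
-- chain multisets preserved
def pvR (K N : Nat) (a b : List Int) : Prop :=
  b.length = a.length ∧ (∀ j : Nat, N ≤ j → b.getD j 0 = a.getD j 0) ∧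
    ∀ c : Nat, c < K → (pvChain K N b c).Perm (pvChain K N a c)

-- total number of chain inversions (the loop variant)
def pvPhi (K N : Nat) (l : List Int) : Nat :=
  ((List.range K).map (fun c => pvInv (pvChain K N l c))).sum

-- the chain-sorted canonical form (what B computes on the main case)
def pvCanon (K N : Nat) (l : List Int) : List Int :=
  (List.range l.length).map (fun j =>
    if j < N then (PySem.List.sorted (pvChain K N l (j % K)) (fun x => x) false).getD (j / K) 0
    else l.getD j 0)

def pvSwapN (l : List Int) (i j : Nat) : List Int :=
  (l.set i (l.getD j 0)).set j (l.getD i 0)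

lemma pvCnt_iff {K N c : Nat} (hK : 0 < K) (hc : c < N) (p : Nat) :
    p < pvCnt K N c ↔ c + p * K < N := by
  unfold pvCnt
  rw [show (p < (N - c + K - 1) / K ↔ p + 1 ≤ (N - c + K - 1) / K) from Iff.rfl,
    Nat.le_div_iff_mul_le hK, Nat.succ_mul]
  omega

lemma pvCnt_le {K N c : Nat} (hK : 0 < K) (hc : c < N) : pvCnt K N c ≤ N := by
  by_contra h
  have h2 : c + N * K < N := (pvCnt_iff hK hc N).mp (by omega)
  have h3 : N * 1 ≤ N * K := Nat.mul_le_mul_left N hK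
  omega

lemma pvGd_set (l : List Int) (i j : Nat) (v : Int) :
    (l.set i v).getD j 0 = if j = i ∧ j < l.length then v else l.getD j 0 := by
  rw [List.getD_eq_getElem?_getD, List.getD_eq_getElem?_getD, List.getElem?_set]
  by_cases h1 : i = j <;> by_cases h2 : j < l.length <;>
    simp [h1, h2] <;> omega

lemma map_range_split1 {α : Type} (m c : Nat) (h : c < m) (f : Nat → α) :
    (List.range m).map f =
      (List.range c).map f ++ f c :: (List.range (m - (c + 1))).map (fun q => f (c + 1 + q)) := by
  have hm : m = (c + 1) + (m - (c + 1)) := by omega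
  rw [hm, List.range_add, List.map_append, List.map_map, List.range_succ, List.map_append]
  simp [Function.comp]

lemma map_range_split2 {α : Type} (m p : Nat) (h : p + 2 ≤ m) (f : Nat → α) :
    (List.range m).map f =
      (List.range p).map f ++ f p :: f (p + 1) ::
        (List.range (m - (p + 2))).map (fun q => f (p + 2 + q)) := by
  have hm : m = (p + 2) + (m - (p + 2)) := by omega
  rw [hm, List.range_add, List.map_append, List.map_map,
    show p + 2 = (p + 1) + 1 from rfl, List.range_succ, List.map_append,
    List.range_succ, List.map_append]
  simp [Function.comp]

lemma pvInv_adjswap (u v : List Int) (a b : Int) (h : b < a) :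
    pvInv (u ++ a :: b :: v) = pvInv (u ++ b :: a :: v) + 1 := by
  induction u with
  | nil =>
    simp only [List.nil_append, pvInv, List.countP_cons]
    have h1 : ¬ a < b := by omega
    simp [h, h1]
    omega
  | cons x u ih =>
    have hperm : (u ++ a :: b :: v).Perm (u ++ b :: a :: v) :=
      List.Perm.append_left u (List.Perm.swap b a v)
    simp only [List.cons_append, pvInv]
    rw [hperm.countP_eq, ih]
    omega

lemma pvInv_le_sq (xs : List Int) : pvInv xs ≤ xs.length * xs.length := by
  induction xs with
  | nil => simp [pvInv]
  | cons x t ih =>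
    simp only [pvInv, List.length_cons]
    have h1 : t.countP (fun y => decide (y < x)) ≤ t.length := List.countP_le_length
    nlinarith

lemma pvR_refl (K N : Nat) (l : List Int) : pvR K N l l :=
  ⟨rfl, fun _ _ => rfl, fun _ _ => List.Perm.refl _⟩

lemma pvR_trans {K N : Nat} {a b c : List Int} (h1 : pvR K N a b) (h2 : pvR K N b c) :
    pvR K N a c :=
  ⟨h2.1.trans h1.1, fun j hj => (h2.2.1 j hj).trans (h1.2.1 j hj),
    fun d hd => (h2.2.2 d hd).trans (h1.2.2 d hd)⟩

-- effect of one legal swap on getD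
lemma pvGd_swapN {l : List Int} {i : Nat} (K : Nat) (hK : 0 < K) (hlt : i + K < l.length) (m : Nat) :
    (pvSwapN l i (i + K)).getD m 0 =
      if m = i then l.getD (i + K) 0 else if m = i + K then l.getD i 0 else l.getD m 0 := by
  unfold pvSwapN
  rw [pvGd_set, List.length_set, pvGd_set]
  by_cases h1 : m = i <;> by_cases h2 : m = i + K <;> simp [h1, h2] <;> omega

lemma length_pvSwapN (l : List Int) (i j : Nat) : (pvSwapN l i j).length = l.length := by
  simp [pvSwapN]

lemma pvChain_length (K N : Nat) (l : List Int) (c : Nat) :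
    (pvChain K N l c).length = pvCnt K N c := by
  simp [pvChain]

lemma pvChain_getElem (K N : Nat) (l : List Int) (c q : Nat)
    (h : q < (pvChain K N l c).length) :
    (pvChain K N l c)[q] = l.getD (c + q * K) 0 := by
  simp [pvChain]

lemma pvChain_eq_of_agree {K N : Nat} {l l' : List Int} (c : Nat)
    (h : ∀ q, q < pvCnt K N c → l'.getD (c + q * K) 0 = l.getD (c + q * K) 0) :
    pvChain K N l' c = pvChain K N l c :=
  List.map_congr_left (fun q hq => h q (List.mem_range.mp hq))

lemma pvF_mono {K N : Nat} {l : List Int} (hK : 0 < K) (hF : pvF K N l) :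
    ∀ (d i : Nat), i + d * K < N → l.getD i 0 ≤ l.getD (i + d * K) 0 := by
  intro d
  induction d with
  | zero => intro i _; simp
  | succ d ih =>
    intro i h
    have hs : (d + 1) * K = d * K + K := Nat.succ_mul d K
    have h2 : i + d * K < N := by omega
    have h3 := hF (i + d * K) (by omega)
    have h4 := le_trans (ih i h2) h3
    have h5 : i + d * K + K = i + (d + 1) * K := by omega
    rwa [h5] at h4

lemma sum_map_range_le (m B : Nat) (f : Nat → Nat) (h : ∀ c, c < m → f c ≤ B) :
    ((List.range m).map f).sum ≤ m * B := by
  induction m with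
  | zero => simp
  | succ m ih =>
    rw [List.range_succ, List.map_append, List.sum_append]
    have h1 := ih (fun c hc => h c (by omega))
    have h2 := h m (by omega)
    simp only [List.map_cons, List.map_nil, List.sum_cons, List.sum_nil]
    have : (m + 1) * B = m * B + B := Nat.succ_mul m B
    omega

lemma map_getD_range_eq_self (S : List Int) (m : Nat) (h : S.length = m) :
    (List.range m).map (fun q => S.getD q 0) = S := by
  apply List.ext_getElem (by simp [h])
  intro q h1 h2
  simp only [List.getElem_map, List.getElem_range]
  exact List.getD_eq_getElem S 0 h2

-- a legal swap leaves every chain a permutation of what it was, and (when it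
-- un-inverts a pair) decreases pvPhi by exactly one
lemma pvSwap_chains {K N : Nat} {l : List Int} {i : Nat} (hK : 0 < K) (hiN : i + K < N)
    (hNL : N ≤ l.length) :
    pvR K N l (pvSwapN l i (i + K)) ∧
      (l.getD (i + K) 0 < l.getD i 0 →
        pvPhi K N (pvSwapN l i (i + K)) + 1 = pvPhi K N l) := by
  set c := i % K with hc
  set p := i / K with hp
  have hcpK : c + p * K = i := Nat.mod_add_div' i K
  have hcK : c < K := Nat.mod_lt i hK
  have hcN : c < N := lt_of_le_of_lt (Nat.mod_le i K) (by omega)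
  have hiL : i + K < l.length := by omega
  have hsucc : (p + 1) * K = p * K + K := Nat.succ_mul p K
  have hp1 : p + 1 < pvCnt K N c := by
    rw [pvCnt_iff hK hcN]
    omega
  have hcnt2 : p + 2 ≤ pvCnt K N c := by omega
  set l' := pvSwapN l i (i + K) with hl'
  have hlen : l'.length = l.length := length_pvSwapN l i (i + K)
  have hgd : ∀ m : Nat, l'.getD m 0 =
      if m = i then l.getD (i + K) 0 else if m = i + K then l.getD i 0 else l.getD m 0 :=
    pvGd_swapN K hK hiL
  have hpos : ∀ q : Nat, c + q * K = i → q = p := by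
    intro q h
    have hq : q * K = p * K := by omega
    exact Nat.eq_of_mul_eq_mul_right hK hq
  have hpos1 : ∀ q : Nat, c + q * K = i + K → q = p + 1 := by
    intro q h
    have hq : q * K = (p + 1) * K := by omega
    exact Nat.eq_of_mul_eq_mul_right hK hq
  have hsplit : ∀ (t : List Int), pvChain K N t c =
      (List.range p).map (fun q => t.getD (c + q * K) 0) ++ t.getD i 0 :: t.getD (i + K) 0 ::
        (List.range (pvCnt K N c - (p + 2))).map (fun q => t.getD (c + (p + 2 + q) * K) 0) := by
    intro t
    unfold pvChain
    rw [map_range_split2 _ p hcnt2]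
    have e1 : c + p * K = i := hcpK
    have e2 : c + (p + 1) * K = i + K := by omega
    rw [e1, e2]
  have hU : (List.range p).map (fun q => l'.getD (c + q * K) 0) =
      (List.range p).map (fun q => l.getD (c + q * K) 0) := by
    apply List.map_congr_left
    intro q hq
    have hql : q < p := List.mem_range.mp hq
    rw [hgd]
    have n1 : ¬ (c + q * K = i) := fun h => by have := hpos q h; omega
    have n2 : ¬ (c + q * K = i + K) := fun h => by have := hpos1 q h; omega
    rw [if_neg n1, if_neg n2]
  have hV : (List.range (pvCnt K N c - (p + 2))).map (fun q => l'.getD (c + (p + 2 + q) * K) 0) =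
      (List.range (pvCnt K N c - (p + 2))).map (fun q => l.getD (c + (p + 2 + q) * K) 0) := by
    apply List.map_congr_left
    intro q _
    rw [hgd]
    have n1 : ¬ (c + (p + 2 + q) * K = i) := fun h => by have := hpos _ h; omega
    have n2 : ¬ (c + (p + 2 + q) * K = i + K) := fun h => by have := hpos1 _ h; omega
    rw [if_neg n1, if_neg n2]
  have hgdi : l'.getD i 0 = l.getD (i + K) 0 := by rw [hgd, if_pos rfl]
  have hgdik : l'.getD (i + K) 0 = l.getD i 0 := by
    rw [hgd, if_neg (by omega), if_pos rfl]
  have hchain' : pvChain K N l' c =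
      (List.range p).map (fun q => l.getD (c + q * K) 0) ++ l.getD (i + K) 0 :: l.getD i 0 ::
        (List.range (pvCnt K N c - (p + 2))).map (fun q => l.getD (c + (p + 2 + q) * K) 0) := by
    rw [hsplit l', hU, hV, hgdi, hgdik]
  have hother : ∀ c', c' < K → c' ≠ c → pvChain K N l' c' = pvChain K N l c' := by
    intro c' hc' hne
    apply pvChain_eq_of_agree
    intro q _
    rw [hgd]
    have hm : (c' + q * K) % K = c' := by
      rw [Nat.add_mul_mod_self_right, Nat.mod_eq_of_lt hc']
    have n1 : ¬ (c' + q * K = i) := by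
      intro h; rw [h] at hm; exact hne hm.symm
    have n2 : ¬ (c' + q * K = i + K) := by
      intro h; rw [h, Nat.add_mod_right] at hm; exact hne hm.symm
    rw [if_neg n1, if_neg n2]
  constructor
  · refine ⟨hlen, ?_, ?_⟩
    · intro j hj
      rw [hgd]
      have n1 : ¬ (j = i) := by omega
      have n2 : ¬ (j = i + K) := by omega
      rw [if_neg n1, if_neg n2]
    · intro c' hc'
      by_cases hcc : c' = c
      · subst hcc
        rw [hchain', hsplit l]
        exact List.Perm.append_left _ (List.Perm.swap _ _ _)
      · rw [hother c' hc' hcc]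
  · intro hba
    unfold pvPhi
    rw [map_range_split1 K c hcK (fun c' => pvInv (pvChain K N l' c')),
        map_range_split1 K c hcK (fun c' => pvInv (pvChain K N l c'))]
    have hU2 : (List.range c).map (fun c' => pvInv (pvChain K N l' c')) =
        (List.range c).map (fun c' => pvInv (pvChain K N l c')) := by
      apply List.map_congr_left
      intro c' hc'
      have h1 : c' < c := List.mem_range.mp hc'
      rw [hother c' (by omega) (by omega)]
    have hV2 : (List.range (K - (c + 1))).map (fun q => pvInv (pvChain K N l' (c + 1 + q))) =
        (List.range (K - (c + 1))).map (fun q => pvInv (pvChain K N l (c + 1 + q))) := by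
      apply List.map_congr_left
      intro q hq
      have h1 : q < K - (c + 1) := List.mem_range.mp hq
      rw [hother (c + 1 + q) (by omega) (by omega)]
    rw [hU2, hV2]
    simp only [List.sum_append, List.sum_cons]
    have hkey : pvInv (pvChain K N l c) = pvInv (pvChain K N l' c) + 1 := by
      rw [hchain', hsplit l]
      exact pvInv_adjswap _ _ _ _ hba
    omega

-- sortedness of a prefix implies the fixed-point property
lemma pvF_of_pairwise {K N : Nat} {l : List Int} (hK : 0 < K) (hNL : N ≤ l.length)
    (h : l.Pairwise (· ≤ ·)) : pvF K N l := by
  intro i hi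
  have h1 : i < l.length := by omega
  have h2 : i + K < l.length := by omega
  rw [List.getD_eq_getElem l 0 h1, List.getD_eq_getElem l 0 h2]
  exact List.pairwise_iff_getElem.mp h i (i + K) h1 h2 (by omega)

-- chains of a fixed point are sorted
lemma pvChain_pairwise_of_F {K N : Nat} {l : List Int} (hK : 0 < K) (hF : pvF K N l) (c : Nat)
    (hc : c < N) : (pvChain K N l c).Pairwise (· ≤ ·) := by
  rw [List.pairwise_iff_getElem]
  intro q q' hq hq' hlt
  rw [pvChain_getElem _ _ _ _ _ hq, pvChain_getElem _ _ _ _ _ hq']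
  have hcnt : q' < pvCnt K N c := by rw [pvChain_length] at hq'; exact hq'
  have hbound : c + q' * K < N := (pvCnt_iff hK hc q').mp hcnt
  have e1 : q' * K = q * K + (q' - q) * K := by
    rw [← Nat.add_mul]; congr 1; omega
  have hd : c + q' * K = (c + q * K) + (q' - q) * K := by omega
  rw [hd]
  exact pvF_mono hK hF (q' - q) (c + q * K) (by omega)

-- uniqueness of the reachable fixed point
lemma pvUnique {K N : Nat} {lst t₁ t₂ : List Int} (hK : 0 < K) (_hKN : K < N)
    (_hNL : N ≤ lst.length) (h₁ : pvR K N lst t₁) (h₂ : pvR K N lst t₂)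
    (hF₁ : pvF K N t₁) (hF₂ : pvF K N t₂) : t₁ = t₂ := by
  apply List.ext_getElem (h₁.1.trans h₂.1.symm)
  intro j hj1 hj2
  by_cases hjN : j < N
  · set c := j % K with hc
    set p := j / K with hp
    have hcpK : c + p * K = j := Nat.mod_add_div' j K
    have hcK : c < K := Nat.mod_lt j hK
    have hcN : c < N := lt_of_le_of_lt (Nat.mod_le j K) hjN
    have hpc : p < pvCnt K N c := (pvCnt_iff hK hcN p).mpr (by omega)
    have hperm : (pvChain K N t₁ c).Perm (pvChain K N t₂ c) :=
      (h₁.2.2 c hcK).trans (h₂.2.2 c hcK).symm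
    have hEq : pvChain K N t₁ c = pvChain K N t₂ c :=
      List.Perm.eq_of_pairwise (fun a b _ _ hab hba => le_antisymm hab hba)
        (pvChain_pairwise_of_F hK hF₁ c hcN) (pvChain_pairwise_of_F hK hF₂ c hcN) hperm
    have hb1 : p < (pvChain K N t₁ c).length := by rw [pvChain_length]; exact hpc
    have hb2 : p < (pvChain K N t₂ c).length := by rw [pvChain_length]; exact hpc
    have e1 := pvChain_getElem K N t₁ c p hb1
    have e2 := pvChain_getElem K N t₂ c p hb2
    have e3 : (pvChain K N t₁ c)[p]'hb1 = (pvChain K N t₂ c)[p]'hb2 := by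
      congr 1
    rw [e1, e2, hcpK] at e3
    rw [List.getD_eq_getElem t₁ 0 hj1, List.getD_eq_getElem t₂ 0 hj2] at e3
    exact e3
  · have hout := (h₁.2.1 j (by omega)).trans (h₂.2.1 j (by omega)).symm
    rw [List.getD_eq_getElem t₁ 0 hj1, List.getD_eq_getElem t₂ 0 hj2] at hout
    exact hout

lemma pvCanon_length (K N : Nat) (l : List Int) : (pvCanon K N l).length = l.length := by
  simp [pvCanon]

lemma pvGd_canon (K N : Nat) (l : List Int) (j : Nat) (hj : j < l.length) :
    (pvCanon K N l).getD j 0 =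
      if j < N then (PySem.List.sorted (pvChain K N l (j % K)) (fun x => x) false).getD (j / K) 0
      else l.getD j 0 := by
  unfold pvCanon
  exact PySem.List.getD_map_range _ _ _ _ hj

lemma pvCanon_chain {K N : Nat} {l : List Int} (hK : 0 < K) (hKN : K < N) (hNL : N ≤ l.length)
    (c : Nat) (hc : c < K) :
    pvChain K N (pvCanon K N l) c = PySem.List.sorted (pvChain K N l c) (fun x => x) false := by
  have hcN : c < N := by omega
  have hS : (PySem.List.sorted (pvChain K N l c) (fun x => x) false).length = pvCnt K N c := by
    rw [PySem.List.length_sorted, pvChain_length]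
  have hstep : pvChain K N (pvCanon K N l) c =
      (List.range (pvCnt K N c)).map
        (fun q => (PySem.List.sorted (pvChain K N l c) (fun x => x) false).getD q 0) := by
    unfold pvChain
    apply List.map_congr_left
    intro q hq
    have hqc : q < pvCnt K N c := List.mem_range.mp hq
    have hqN : c + q * K < N := (pvCnt_iff hK hcN q).mp hqc
    rw [pvGd_canon K N l _ (by omega)]
    have hmod : (c + q * K) % K = c := by
      rw [Nat.add_mul_mod_self_right, Nat.mod_eq_of_lt hc]
    have hdiv : (c + q * K) / K = q := by
      rw [Nat.add_mul_div_right _ _ hK, Nat.div_eq_of_lt hc]; omega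
    rw [if_pos hqN, hmod, hdiv]
    rfl
  rw [hstep, map_getD_range_eq_self _ _ hS]

lemma pvCanon_R {K N : Nat} {l : List Int} (hK : 0 < K) (hKN : K < N) (hNL : N ≤ l.length) :
    pvR K N l (pvCanon K N l) := by
  refine ⟨pvCanon_length K N l, ?_, ?_⟩
  · intro j hj
    by_cases hjL : j < l.length
    · rw [pvGd_canon K N l j hjL, if_neg (by omega)]
    · rw [List.getD_eq_default _ _ (by rw [pvCanon_length]; omega),
        List.getD_eq_default _ _ (by omega)]
  · intro c hcK
    rw [pvCanon_chain hK hKN hNL c hcK]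
    exact PySem.List.sorted_perm _ _ _

lemma pvCanon_F {K N : Nat} {l : List Int} (hK : 0 < K) (hKN : K < N) (hNL : N ≤ l.length) :
    pvF K N (pvCanon K N l) := by
  intro i hiN
  have hcK : i % K < K := Nat.mod_lt i hK
  have hcN : i % K < N := lt_of_le_of_lt (Nat.mod_le i K) (by omega)
  have hcpK : i % K + (i / K) * K = i := Nat.mod_add_div' i K
  have hsucc : (i / K + 1) * K = (i / K) * K + K := Nat.succ_mul _ K
  have hp1 : i / K + 1 < pvCnt K N (i % K) := by rw [pvCnt_iff hK hcN]; omega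
  have hS : (PySem.List.sorted (pvChain K N l (i % K)) (fun x => x) false).length =
      pvCnt K N (i % K) := by
    rw [PySem.List.length_sorted, pvChain_length]
  rw [pvGd_canon K N l i (by omega), pvGd_canon K N l (i + K) (by omega),
    if_pos (show i < N by omega), if_pos hiN,
    show (i + K) % K = i % K from Nat.add_mod_right i K,
    show (i + K) / K = i / K + 1 from Nat.add_div_right i hK,
    List.getD_eq_getElem _ 0 (by rw [hS]; omega),
    List.getD_eq_getElem _ 0 (by rw [hS]; omega)]
  exact PySem.List.sorted_id_getElem_mono _ (by omega) _

-- what one bubble pass of A does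
lemma pvPass_spec {K N : Nat} (s : List Int) (hK : 0 < K) (hKN : K < N) :
    ∀ (jN : Nat) (l : List Int) (sw : Bool), N ≤ l.length →
    (match pvPassA s (K : Int) l sw (PySem.List.pyRange (jN : Int) ((N : Int) - (K : Int)) 1) with
     | none => pvR K N l s
     | some (l', sw') =>
         pvR K N l l' ∧ pvPhi K N l' ≤ pvPhi K N l ∧ (l' = l ∨ l' ≠ s) ∧
           (sw = false → sw' = true → pvPhi K N l' < pvPhi K N l) ∧
           (sw' = false → sw = false ∧ l' = l ∧
             ∀ i : Nat, jN ≤ i → i + K < N → l.getD i 0 ≤ l.getD (i + K) 0)) := by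
  have main : ∀ (d jN : Nat) (l : List Int) (sw : Bool), N ≤ l.length → N - K - jN ≤ d →
      (match pvPassA s (K : Int) l sw (PySem.List.pyRange (jN : Int) ((N : Int) - (K : Int)) 1) with
       | none => pvR K N l s
       | some (l', sw') =>
           pvR K N l l' ∧ pvPhi K N l' ≤ pvPhi K N l ∧ (l' = l ∨ l' ≠ s) ∧
             (sw = false → sw' = true → pvPhi K N l' < pvPhi K N l) ∧
             (sw' = false → sw = false ∧ l' = l ∧
               ∀ i : Nat, jN ≤ i → i + K < N → l.getD i 0 ≤ l.getD (i + K) 0)) := by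
    intro d
    induction d with
    | zero =>
      intro jN l sw hNL hd
      rw [PySem.List.pyRange_one_eq_nil (by omega)]
      simp only [pvPassA]
      refine ⟨pvR_refl K N l, le_refl _, by simp, ?_, ?_⟩
      · intro h1 h2; rw [h1] at h2; simp at h2
      · intro h1; exact ⟨h1, by simp, fun i hji hiN => by omega⟩
    | succ d ih =>
      intro jN l sw hNL hd
      by_cases hj : N - K ≤ jN
      · rw [PySem.List.pyRange_one_eq_nil (by omega)]
        simp only [pvPassA]
        refine ⟨pvR_refl K N l, le_refl _, by simp, ?_, ?_⟩
        · intro h1 h2; rw [h1] at h2; simp at h2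
        · intro h1; exact ⟨h1, by simp, fun i hji hiN => by omega⟩
      · rw [PySem.List.pyRange_one_cons (by omega),
          show ((jN : Int) + 1) = ((jN + 1 : Nat) : Int) by push_cast; ring]
        simp only [pvPassA]
        have hga : PySem.List.pyGetD l ((jN : Int) + (K : Int)) 0 = l.getD (jN + K) 0 := by
          rw [PySem.List.pyGetD_of_nonneg l 0 (by omega),
            show ((jN : Int) + (K : Int)).toNat = jN + K by omega]
        have hgb : PySem.List.pyGetD l (jN : Int) 0 = l.getD jN 0 := by
          rw [PySem.List.pyGetD_of_nonneg l 0 (by omega), Int.toNat_natCast]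
        rw [hga, hgb]
        have hsw : pvSwitch l (jN : Int) ((jN : Int) + (K : Int)) = pvSwapN l jN (jN + K) := by
          have e1 : ((jN : Int)).toNat = jN := by omega
          have e2 : ((jN : Int) + (K : Int)).toNat = jN + K := by omega
          show PySem.List.pySetD
              (PySem.List.pySetD l (jN : Int) (PySem.List.pyGetD l ((jN : Int) + (K : Int)) 0))
              ((jN : Int) + (K : Int)) (PySem.List.pyGetD l (jN : Int) 0) = _
          rw [hga, hgb,
            PySem.List.pySetD_of_nonneg _ _ (show (0:Int) ≤ (jN : Int) + (K : Int) by omega),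
            PySem.List.pySetD_of_nonneg _ _ (show (0:Int) ≤ (jN : Int) by omega), e1, e2]
          rfl
        by_cases hcmp : l.getD (jN + K) 0 < l.getD jN 0
        · rw [if_pos hcmp, hsw]
          obtain ⟨hR1, hPhi1⟩ :=
            pvSwap_chains (l := l) (i := jN) hK (by omega) hNL
          have hphi : pvPhi K N (pvSwapN l jN (jN + K)) + 1 = pvPhi K N l := hPhi1 hcmp
          by_cases heq : pvSwapN l jN (jN + K) = s
          · rw [if_pos heq]
            exact heq ▸ hR1
          · rw [if_neg heq]
            have hrec := ih (jN + 1) (pvSwapN l jN (jN + K)) true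
              (by rw [length_pvSwapN]; exact hNL) (by omega)
            cases hm : pvPassA s (K : Int) (pvSwapN l jN (jN + K)) true
                (PySem.List.pyRange ((jN + 1 : Nat) : Int) ((N : Int) - (K : Int)) 1) with
            | none =>
              rw [hm] at hrec
              exact pvR_trans hR1 hrec
            | some pair =>
              obtain ⟨l', sw'⟩ := pair
              rw [hm] at hrec
              obtain ⟨hR2, hPhi2, hns, _, hsw'⟩ := hrec
              refine ⟨pvR_trans hR1 hR2, by omega, ?_, fun _ _ => by omega, ?_⟩
              · rcases hns with h | h
                · exact Or.inr (h ▸ heq)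
                · exact Or.inr h
              · intro hf
                exact absurd (hsw' hf).1 (by simp)
        · rw [if_neg hcmp]
          have hrec := ih (jN + 1) l sw hNL (by omega)
          cases hm : pvPassA s (K : Int) l sw
              (PySem.List.pyRange ((jN + 1 : Nat) : Int) ((N : Int) - (K : Int)) 1) with
          | none =>
            rw [hm] at hrec
            exact hrec
          | some pair =>
            obtain ⟨l', sw'⟩ := pair
            rw [hm] at hrec
            obtain ⟨hR2, hPhi2, hns, hstrict, hsw'⟩ := hrec
            refine ⟨hR2, hPhi2, hns, hstrict, ?_⟩
            intro hf
            obtain ⟨h1, h2, h3⟩ := hsw' hf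
            refine ⟨h1, h2, fun i hji hiN => ?_⟩
            by_cases hij : i = jN
            · subst hij; exact le_of_not_gt hcmp
            · exact h3 i (by omega) hiN
  intro jN l sw hNL
  exact main (N - K - jN) jN l sw hNL (le_refl _)

lemma pvLoop_spec {K N : Nat} {lst s : List Int}
    (hs : s = PySem.List.sorted lst (fun x => x) false)
    (hK : 0 < K) (hKN : K < N) (hNL : N ≤ lst.length) :
    ∀ (fuel : Nat) (l : List Int), pvR K N lst l → l ≠ s → pvPhi K N l < fuel →
      pvLoopA s (N : Int) (K : Int) fuel l =
        (if pvCanon K N lst = s then "YES" else "NO") := by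
  intro fuel
  induction fuel with
  | zero => intro l _ _ h; omega
  | succ fuel ih =>
    intro l hR hne hPhi
    simp only [pvLoopA]
    rw [if_neg hne]
    have hNL' : N ≤ l.length := by rw [hR.1]; exact hNL
    have hpass := pvPass_spec s hK hKN 0 l false hNL'
    simp only [Nat.cast_zero] at hpass
    cases hm : pvPassA s (K : Int) l false (PySem.List.pyRange 0 ((N : Int) - (K : Int)) 1) with
    | none =>
      rw [hm] at hpass
      have hRs : pvR K N lst s := pvR_trans hR hpass
      have hpair : s.Pairwise (· ≤ ·) := by
        have := PySem.List.sorted_pairwise lst (fun x => x)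
        rw [← hs] at this
        exact this
      have hFs : pvF K N s := pvF_of_pairwise hK (by rw [hRs.1]; exact hNL) hpair
      have hcanon : pvCanon K N lst = s :=
        pvUnique hK hKN hNL (pvCanon_R hK hKN hNL) hRs (pvCanon_F hK hKN hNL) hFs
      rw [if_pos hcanon]
    | some pair =>
      obtain ⟨l', sw'⟩ := pair
      rw [hm] at hpass
      obtain ⟨hR2, hPhi2, hns, hstrict, hsw'⟩ := hpass
      cases sw' with
      | false =>
        obtain ⟨-, hleq, hnos⟩ := hsw' rfl
        have hFl : pvF K N l := fun i hi => hnos i (Nat.zero_le i) hi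
        have hcl : pvCanon K N lst = l :=
          pvUnique hK hKN hNL (pvCanon_R hK hKN hNL) hR (pvCanon_F hK hKN hNL) hFl
        have hcne : pvCanon K N lst ≠ s := by rw [hcl]; exact hne
        show (if false = true then pvLoopA s (N : Int) (K : Int) fuel l' else "NO") = _
        rw [if_neg hcne]
        simp
      | true =>
        have hlt : pvPhi K N l' < pvPhi K N l := hstrict trivial rfl
        have hne' : l' ≠ s := by
          rcases hns with h | h
          · rw [h]; exact hne
          · exact h
        show (if true = true then pvLoopA s (N : Int) (K : Int) fuel l' else "NO") = _
        rw [if_pos rfl]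
        exact ih l' (pvR_trans hR hR2) hne' (by omega)

lemma pvPhi_lt_fuel {K N : Nat} (l : List Int) (hK : 0 < K) (hKN : K < N) (hNL : N ≤ l.length) :
    pvPhi K N l < l.length * l.length * l.length + 1 := by
  have hbound : ∀ c, c < K → pvInv (pvChain K N l c) ≤ l.length * l.length := by
    intro c hc
    have h1 := pvInv_le_sq (pvChain K N l c)
    have h2 : (pvChain K N l c).length ≤ l.length := by
      rw [pvChain_length]
      exact le_trans (pvCnt_le hK (by omega)) hNL
    exact le_trans h1 (Nat.mul_le_mul h2 h2)
  have h3 : pvPhi K N l ≤ K * (l.length * l.length) :=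
    sum_map_range_le K _ _ hbound
  have h4 : K ≤ l.length := by omega
  have h5 : K * (l.length * l.length) ≤ l.length * (l.length * l.length) :=
    Nat.mul_le_mul_right _ h4
  have h6 : l.length * (l.length * l.length) = l.length * l.length * l.length := by ring
  omega

-- with k = 0 the pass compares each element with itself and never swaps
lemma pvPass_zero (s : List Int) (idxs : List Int) (l : List Int) (sw : Bool) :
    pvPassA s 0 l sw idxs = some (l, sw) := by
  induction idxs with
  | nil => rfl
  | cons i rest ih => simp [pvPassA, ih]

-- the write-back fold of one residue pass of B
def pvWr (c K m : Nat) (vals u : List Int) : List Int :=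
  (((List.range m).map (fun p : Nat => (c : Int) + (K : Int) * (p : Int))).zip vals).foldl
    (fun t pv => PySem.List.pySetD t pv.1 pv.2) u

lemma pvWr_succ (c K m : Nat) (vals u : List Int) (hv : vals.length = m + 1) :
    pvWr c K (m + 1) vals u =
      (pvWr c K m (vals.take m) u).set (c + m * K) (vals.getD m 0) := by
  unfold pvWr
  rw [List.range_succ, List.map_append]
  have hsplit : vals.take m ++ vals.drop m = vals := List.take_append_drop m vals
  have hm : m < vals.length := by omega
  have hdrop : vals.drop m = [vals.getD m 0] := by
    rw [List.drop_eq_getElem_cons hm, List.drop_eq_nil_of_le (by omega),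
      List.getD_eq_getElem vals 0 hm]
  have hz : (((List.range m).map (fun p : Nat => (c : Int) + (K : Int) * (p : Int))) ++
        [(c : Int) + (K : Int) * (m : Int)]).zip vals
      = ((List.range m).map (fun p : Nat => (c : Int) + (K : Int) * (p : Int))).zip (vals.take m)
        ++ [((c : Int) + (K : Int) * (m : Int), vals.getD m 0)] := by
    conv_lhs => rw [← hsplit]
    rw [List.zip_append (by rw [List.length_map, List.length_range, List.length_take]; omega),
      hdrop]
    rfl
  simp only [List.map_cons, List.map_nil]
  rw [hz, List.foldl_append]
  simp only [List.foldl_cons, List.foldl_nil]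
  rw [PySem.List.pySetD_of_nonneg _ _ (by positivity),
    show ((c : Int) + (K : Int) * (m : Int)).toNat = c + m * K by
      rw [show ((c : Int) + (K : Int) * (m : Int)) = ((c + m * K : Nat) : Int) by push_cast; ring,
        Int.toNat_natCast]]

lemma pvWr_spec (c K : Nat) (hK : 0 < K) :
    ∀ (m : Nat) (vals u : List Int), vals.length = m →
      (pvWr c K m vals u).length = u.length ∧
      (∀ p, p < m → c + p * K < u.length →
        (pvWr c K m vals u).getD (c + p * K) 0 = vals.getD p 0) ∧
      (∀ j : Nat, (∀ p, p < m → j ≠ c + p * K) → (pvWr c K m vals u).getD j 0 = u.getD j 0) := by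
  intro m
  induction m with
  | zero =>
    intro vals u _
    exact ⟨rfl, fun p hp _ => by omega, fun j _ => rfl⟩
  | succ m ih =>
    intro vals u hv
    rw [pvWr_succ c K m vals u hv]
    obtain ⟨ihl, ihp, ihu⟩ := ih (vals.take m) u (by rw [List.length_take]; omega)
    have hinj : ∀ p q : Nat, c + p * K = c + q * K → p = q := by
      intro p q h
      have h2 : p * K = q * K := by omega
      exact Nat.eq_of_mul_eq_mul_right hK h2
    refine ⟨by rw [List.length_set, ihl], ?_, ?_⟩
    · intro p hp hpl
      rw [pvGd_set]
      by_cases hpm : p = m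
      · subst hpm
        rw [if_pos ⟨rfl, by rw [ihl]; exact hpl⟩]
      · rw [if_neg (by intro h; exact hpm (hinj p m h.1)),
          ihp p (by omega) hpl,
          List.getD_eq_getElem _ 0 (by rw [List.length_take]; omega),
          List.getD_eq_getElem _ 0 (by omega), List.getElem_take]
    · intro j hj
      rw [pvGd_set, if_neg (by intro h; exact hj m (by omega) h.1),
        ihu j (fun p hp => hj p (by omega))]

lemma pvIdx_eq {K N c : Nat} (hK : 0 < K) (hc : c < N) :
    PySem.List.pyRange (c : Int) (N : Int) (K : Int) =
      (List.range (pvCnt K N c)).map (fun p : Nat => (c : Int) + (K : Int) * (p : Int)) := by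
  rw [PySem.List.pyRange_of_pos _ _ (by omega : (0:Int) < (K : Int))]
  congr 1
  rw [if_pos (by omega : (c : Int) < (N : Int)),
    show ((N : Int) - c + K - 1) = ((N - c + K - 1 : Nat) : Int) by omega,
    ← Int.natCast_div, Int.toNat_natCast]
  rfl

lemma pvVals_eq {K N c : Nat} (hK : 0 < K) (hc : c < N) (u : List Int) :
    (PySem.List.pyRange (c : Int) (N : Int) (K : Int)).map (fun i => PySem.List.pyGetD u i 0) =
      pvChain K N u c := by
  rw [pvIdx_eq hK hc, List.map_map]
  unfold pvChain
  apply List.map_congr_left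
  intro p _
  simp only [Function.comp]
  rw [PySem.List.pyGetD_of_nonneg u 0 (by positivity),
    show ((c : Int) + (K : Int) * (p : Int)).toNat = c + p * K by
      rw [show ((c : Int) + (K : Int) * (p : Int)) = ((c + p * K : Nat) : Int) by push_cast; ring,
        Int.toNat_natCast]]

lemma pvB_inv {K N : Nat} (lst : List Int) (hK : 0 < K) (hKN : K < N) (hNL : N ≤ lst.length) :
    ∀ r : Nat, r ≤ K →
      (((List.range r).foldl (fun t (q : Nat) =>
        (((PySem.List.pyRange (q : Int) (N : Int) (K : Int)).zip
          (PySem.List.sorted ((PySem.List.pyRange (q : Int) (N : Int) (K : Int)).map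
            (fun i => PySem.List.pyGetD t i 0)) (fun x => x) false)).foldl
          (fun t pv => PySem.List.pySetD t pv.1 pv.2) t)) lst).length = lst.length) ∧
      (∀ j : Nat, j < lst.length →
        ((List.range r).foldl (fun t (q : Nat) =>
          (((PySem.List.pyRange (q : Int) (N : Int) (K : Int)).zip
            (PySem.List.sorted ((PySem.List.pyRange (q : Int) (N : Int) (K : Int)).map
              (fun i => PySem.List.pyGetD t i 0)) (fun x => x) false)).foldl
            (fun t pv => PySem.List.pySetD t pv.1 pv.2) t)) lst).getD j 0 =
          if j < N ∧ j % K < r then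
            (PySem.List.sorted (pvChain K N lst (j % K)) (fun x => x) false).getD (j / K) 0
          else lst.getD j 0) := by
  intro r
  induction r with
  | zero =>
    intro _
    exact ⟨rfl, fun j _ => (if_neg (by simp)).symm⟩
  | succ r ih =>
    intro hrK
    have hr : r < K := by omega
    have hrN : r < N := by omega
    obtain ⟨ihl, ihj⟩ := ih (by omega)
    rw [List.range_succ, List.foldl_append]
    simp only [List.foldl_cons, List.foldl_nil]
    set u := (List.range r).foldl (fun t (q : Nat) =>
        (((PySem.List.pyRange (q : Int) (N : Int) (K : Int)).zip
          (PySem.List.sorted ((PySem.List.pyRange (q : Int) (N : Int) (K : Int)).map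
            (fun i => PySem.List.pyGetD t i 0)) (fun x => x) false)).foldl
          (fun t pv => PySem.List.pySetD t pv.1 pv.2) t)) lst with hu
    have hchainu : pvChain K N u r = pvChain K N lst r := by
      apply pvChain_eq_of_agree
      intro q hq
      have hqN : r + q * K < N := (pvCnt_iff hK hrN q).mp hq
      have hmod : (r + q * K) % K = r := by
        rw [Nat.add_mul_mod_self_right, Nat.mod_eq_of_lt hr]
      rw [ihj (r + q * K) (by omega), if_neg (by rw [hmod]; omega)]
    have hstep : (((PySem.List.pyRange (r : Int) (N : Int) (K : Int)).zip
          (PySem.List.sorted ((PySem.List.pyRange (r : Int) (N : Int) (K : Int)).map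
            (fun i => PySem.List.pyGetD u i 0)) (fun x => x) false)).foldl
          (fun t pv => PySem.List.pySetD t pv.1 pv.2) u) =
        pvWr r K (pvCnt K N r)
          (PySem.List.sorted (pvChain K N lst r) (fun x => x) false) u := by
      rw [pvVals_eq hK hrN u, hchainu, pvIdx_eq hK hrN]
      rfl
    rw [hstep]
    have hSlen : (PySem.List.sorted (pvChain K N lst r) (fun x => x) false).length =
        pvCnt K N r := by
      rw [PySem.List.length_sorted, pvChain_length]
    obtain ⟨hwl, hwp, hwu⟩ := pvWr_spec r K hK (pvCnt K N r)
      (PySem.List.sorted (pvChain K N lst r) (fun x => x) false) u hSlen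
    refine ⟨by rw [hwl, ihl], ?_⟩
    intro j hjL
    by_cases hcase : j < N ∧ j % K = r
    · obtain ⟨hjN, hjr⟩ := hcase
      have hjdec : r + (j / K) * K = j := by rw [← hjr]; exact Nat.mod_add_div' j K
      have hpc : j / K < pvCnt K N r := (pvCnt_iff hK hrN _).mpr (by omega)
      have := hwp (j / K) hpc (by rw [ihl]; omega)
      rw [hjdec] at this
      rw [this, if_pos ⟨hjN, by omega⟩, hjr]
    · have huntouched : ∀ p, p < pvCnt K N r → j ≠ r + p * K := by
        intro p hp heq
        have hqN : r + p * K < N := (pvCnt_iff hK hrN p).mp hp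
        have hmod : (r + p * K) % K = r := by
          rw [Nat.add_mul_mod_self_right, Nat.mod_eq_of_lt hr]
        exact hcase ⟨by omega, by rw [heq, hmod]⟩
      rw [hwu j huntouched, ihj j hjL]
      by_cases hjN : j < N
      · by_cases hjr : j % K < r
        · rw [if_pos ⟨hjN, hjr⟩, if_pos ⟨hjN, by omega⟩]
        · rw [if_neg (by intro h; exact hjr h.2),
            if_neg (by intro h; exact hcase ⟨hjN, by omega⟩)]
      · rw [if_neg (by intro h; exact hjN h.1), if_neg (by intro h; exact hjN h.1)]

-- B's fold computes the canonical form
lemma pvB_fold {K N : Nat} {lst : List Int} (hK : 0 < K) (hKN : K < N) (hNL : N ≤ lst.length) :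
    ((PySem.List.pyRange 0 (K : Int) 1).foldl (fun t r =>
      let idx := PySem.List.pyRange r (N : Int) (K : Int)
      let vals := PySem.List.sorted (idx.map (fun i => PySem.List.pyGetD t i 0)) (fun x => x) false
      (idx.zip vals).foldl (fun t pv => PySem.List.pySetD t pv.1 pv.2) t) lst) =
      pvCanon K N lst := by
  rw [PySem.List.pyRange_one, show (((K : Int) - 0).toNat) = K by omega, List.foldl_map]
  show ((List.range K).foldl (fun t (q : Nat) =>
      (((PySem.List.pyRange ((0 : Int) + (q : Int)) (N : Int) (K : Int)).zip
        (PySem.List.sorted ((PySem.List.pyRange ((0 : Int) + (q : Int)) (N : Int) (K : Int)).map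
          (fun i => PySem.List.pyGetD t i 0)) (fun x => x) false)).foldl
        (fun t pv => PySem.List.pySetD t pv.1 pv.2) t)) lst) = pvCanon K N lst
  simp only [zero_add]
  obtain ⟨hl, hj⟩ := pvB_inv lst hK hKN hNL K (le_refl K)
  apply List.ext_getElem (by rw [hl, pvCanon_length])
  intro j h1 h2
  have hjL : j < lst.length := by rw [hl] at h1; exact h1
  have hval := hj j hjL
  rw [List.getD_eq_getElem _ 0 h1] at hval
  rw [hval, ← List.getD_eq_getElem (pvCanon K N lst) 0 h2,
    pvGd_canon K N lst j (by rw [pvCanon_length] at h2; exact h2)]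
  by_cases hjN : j < N
  · rw [if_pos ⟨hjN, Nat.mod_lt j hK⟩, if_pos hjN]
  · rw [if_neg (fun h => hjN h.1), if_neg hjN]

-- ===== VERDICT (by name: the statement is the Claim_ definition above) =====
theorem scarecrow_sort_spec : Claim_equal_scarecrow_sort := by
  intro n k lst hDom hPre
  obtain ⟨hnlk, hns⟩ := hPre
  unfold Spec_scarecrow_sort
  by_cases hnk : n ≤ k
  · have hA : scarecrow_sort n k lst = "NO" := by
      simp only [scarecrow_sort, pvLoopA]
      rw [if_neg hns,
        show PySem.List.pyRange 0 (n - k) 1 = []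
          from PySem.List.pyRange_one_eq_nil (by omega)]
      rfl
    have hB : scarecrow_sort_alt n k lst = "NO" := by
      simp only [scarecrow_sort_alt]
      rw [if_neg hns]
      by_cases hk : k ≤ 0
      · rw [if_pos (Or.inl hk)]
      · rw [if_pos (Or.inr hnk)]
    rw [hA, hB]
  · obtain ⟨hk0, hnL⟩ : 0 ≤ k ∧ n ≤ (lst.length : Int) := by
      rcases hnlk with h | h
      · omega
      · exact h
    by_cases hk : k ≤ 0
    · have hkz : k = 0 := le_antisymm hk hk0
      subst hkz
      have hA : scarecrow_sort n 0 lst = "NO" := by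
        simp only [scarecrow_sort, pvLoopA]
        rw [if_neg hns, pvPass_zero]
        rfl
      have hB : scarecrow_sort_alt n 0 lst = "NO" := by
        simp only [scarecrow_sort_alt]
        rw [if_neg hns, if_pos (Or.inl (le_refl (0 : Int)))]
      rw [hA, hB]
    · have hkN : k < n := by omega
      have hK : 0 < k.toNat := by omega
      have hKN : k.toNat < n.toNat := by omega
      have hNL : n.toNat ≤ lst.length := by omega
      have hkK : k = ((k.toNat : Nat) : Int) := by omega
      have hnN : n = ((n.toNat : Nat) : Int) := by omega
      have hA : scarecrow_sort n k lst =
          (if pvCanon k.toNat n.toNat lst = PySem.List.sorted lst (fun x => x) false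
           then "YES" else "NO") := by
        simp only [scarecrow_sort]
        conv_lhs => rw [hkK, hnN]
        exact pvLoop_spec rfl hK hKN hNL _ lst (pvR_refl _ _ _) hns
          (pvPhi_lt_fuel lst hK hKN hNL)
      have hB : scarecrow_sort_alt n k lst =
          (if pvCanon k.toNat n.toNat lst = PySem.List.sorted lst (fun x => x) false
           then "YES" else "NO") := by
        simp only [scarecrow_sort_alt]
        rw [if_neg hns,
          if_neg (show ¬(k ≤ 0 ∨ n ≤ k) by intro h; rcases h with h | h <;> omega)]
        conv_lhs => rw [hkK, hnN, pvB_fold hK hKN hNL]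
      rw [hA, hB]
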